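-- pv_equiv track=rewrite | github.com/coda-nsit/leetcode | 68.py | findSameLineWords
-- ===== SOURCE A (Python) =====
-- def findSameLineWords(start, maxWidth, words):
--     chars = 0
--     '''
--     maxWidth + 1 cause the last word of every sentence doesn't have a space, so in case the last word of the sentence fits exactly we need to accomodate the fact that it has no trailing space
--     "enough to explain to" maxWidth=20
--     '''
--     while start < len(words) and chars + len(words[start]) + 1 <= maxWidth + 1:
--         chars += len(words[start]) + 1
--         start += 1
--     return start - 1
-- ===== SOURCE B (Python) =====
-- def findSameLineWords(start, maxWidth, words):
--     # prefix[i] = width of words[start:start+i+1], each word counted with one trailing space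
--     prefix = []
--     total = 0
--     for w in words[start:]:
--         total += len(w) + 1
--         prefix.append(total)
--     # binary search: rightmost position with prefix value <= maxWidth + 1
--     lo, hi = 0, len(prefix)
--     while lo < hi:
--         mid = (lo + hi) // 2
--         if prefix[mid] <= maxWidth + 1:
--             lo = mid + 1
--         else:
--             hi = mid
--     return start + lo - 1
-- ===== Notes on version B (the rewrite author's own statement) =====
-- stated objective: alternative
-- what changed: Replaces the incremental greedy accumulator loop with a prefix-sum table over words[start:] plus a hand-written binary search (bisect_right) for maxWidth+1; correctness rests on the prefix sums being strictly increasing.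
-- outside the precondition, e.g. on findSameLineWords(-2, 100, ['aa', 'bb', 'cc']): A returns 2, B returns -1
import Mathlib
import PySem

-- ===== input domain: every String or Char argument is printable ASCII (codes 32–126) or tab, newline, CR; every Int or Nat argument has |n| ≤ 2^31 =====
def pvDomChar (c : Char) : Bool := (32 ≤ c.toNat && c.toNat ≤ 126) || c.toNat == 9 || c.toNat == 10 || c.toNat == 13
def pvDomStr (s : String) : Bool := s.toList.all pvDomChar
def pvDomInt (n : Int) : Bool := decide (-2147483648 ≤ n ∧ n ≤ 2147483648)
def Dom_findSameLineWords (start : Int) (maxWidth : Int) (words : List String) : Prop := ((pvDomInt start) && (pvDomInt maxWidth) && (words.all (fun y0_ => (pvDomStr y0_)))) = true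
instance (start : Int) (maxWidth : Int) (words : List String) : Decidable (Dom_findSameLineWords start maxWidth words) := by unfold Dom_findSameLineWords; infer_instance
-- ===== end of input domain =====

-- B replaces A's greedy accumulator loop by a prefix-sum table over words[start:] and a
-- binary search for maxWidth+1 in it (alternative decomposition; not claimed faster).


-- ===== PORT A =====
-- A's while loop as fuel recursion; returns the final value of `start`.
-- Indexing via pyGetD is exact under Pre_ (0 ≤ start): the loop guard keeps start < len(words).
def pvALoop (words : List String) (maxWidth : Int) : Nat → Int → Int → Int
  | 0, start, _ => start
  | fuel + 1, start, chars =>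
    if start < PySem.List.len words then
      let w := PySem.List.pyGetD words start ""
      if chars + PySem.Str.len w + 1 ≤ maxWidth + 1 then
        pvALoop words maxWidth fuel (start + 1) (chars + PySem.Str.len w + 1)
      else start
    else start

def findSameLineWords (start : Int) (maxWidth : Int) (words : List String) : Int :=
  pvALoop words maxWidth ((PySem.List.len words - start).toNat) start 0 - 1

-- ===== PORT B =====
-- prefix-sum table of len(w)+1 over the given list, starting from `total`
def pvPrefix : List String → Int → List Int
  | [], _ => []
  | w :: ws, total => (total + PySem.Str.len w + 1) :: pvPrefix ws (total + PySem.Str.len w + 1)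

-- Source B's hand-written bisect_right loop on the prefix table (fuel recursion)
def pvBisect (p : List Int) (target : Int) : Nat → Nat → Nat → Nat
  | 0, lo, _ => lo
  | fuel + 1, lo, hi =>
    if lo < hi then
      let mid := (lo + hi) / 2
      if p.getD mid 0 ≤ target then pvBisect p target fuel (mid + 1) hi
      else pvBisect p target fuel lo mid
    else lo

def findSameLineWords_alt (start : Int) (maxWidth : Int) (words : List String) : Int :=
  let p := pvPrefix (PySem.List.slice words (some start) none) 0
  start + (pvBisect p (maxWidth + 1) (p.length + 1) 0 p.length : Int) - 1

-- ===== PRECONDITION & SPEC =====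
-- Pre_ excludes negative start: there A either raises IndexError (start < -len(words)) or
-- returns a value produced by Python's accidental negative-index wraparound (reading the tail
-- of the list and then continuing from the front), a corner nobody would specify; B's
-- slice-based value there is equally accidental.
def Pre_findSameLineWords (start : Int) (maxWidth : Int) (words : List String) : Prop := 0 ≤ start
instance (start : Int) (maxWidth : Int) (words : List String) : Decidable (Pre_findSameLineWords start maxWidth words) := by unfold Pre_findSameLineWords; infer_instance
def pvWitness_findSameLineWords : Int × Int × List String := (0, 10, ["ab", "c"])

def Spec_findSameLineWords (start : Int) (maxWidth : Int) (words : List String) (out : Int) : Prop := out = findSameLineWords_alt start maxWidth words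
instance (start : Int) (maxWidth : Int) (words : List String) (out : Int) : Decidable (Spec_findSameLineWords start maxWidth words out) := by unfold Spec_findSameLineWords; infer_instance

-- ===== CLAIM (what is proved, stated in full; the proofs are below) =====
def Claim_equal_findSameLineWords : Prop := ∀ (start : Int) (maxWidth : Int) (words : List String), Dom_findSameLineWords start maxWidth words → Pre_findSameLineWords start maxWidth words → Spec_findSameLineWords start maxWidth words (findSameLineWords start maxWidth words)

-- ===== LEMMAS AND PROOFS =====

-- greedy count: how many words fit, starting from accumulated width `chars`
def pvCnt (target : Int) : Int → List String → Nat
  | _, [] => 0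
  | chars, w :: ws =>
    if chars + PySem.Str.len w + 1 ≤ target then pvCnt target (chars + PySem.Str.len w + 1) ws + 1
    else 0

theorem pvALoop_eq_cnt (words : List String) (maxWidth : Int) :
    ∀ (fuel : Nat) (start chars : Int), 0 ≤ start →
    ((words.length : Int) - start).toNat ≤ fuel →
    pvALoop words maxWidth fuel start chars =
      start + (pvCnt (maxWidth + 1) chars (words.drop start.toNat) : Int) := by
  intro fuel
  induction fuel with
  | zero =>
    intro start chars h0 hf
    have hlen : words.length ≤ start.toNat := by omega
    simp [pvALoop, List.drop_eq_nil_of_le hlen, pvCnt]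
  | succ fuel ih =>
    intro start chars h0 hf
    by_cases hlt : start < (words.length : Int)
    · have hidx : start.toNat < words.length := by omega
      have hget : PySem.List.pyGetD words start "" = words[start.toNat] :=
        PySem.List.pyGetD_eq_getElem words "" h0 (by exact_mod_cast hlt)
      have hdrop : words.drop start.toNat = words[start.toNat] :: words.drop (start.toNat + 1) :=
        List.drop_eq_getElem_cons hidx
      simp only [pvALoop, PySem.List.len_eq, hlt, if_true, hget, hdrop, pvCnt]
      by_cases hfit : chars + PySem.Str.len words[start.toNat] + 1 ≤ maxWidth + 1
      · simp only [hfit, if_true]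
        have h1 : (start + 1).toNat = start.toNat + 1 := by omega
        rw [ih (start + 1) _ (by omega) (by omega), h1]
        push_cast
        ring
      · have hfit' : ¬ chars + (words[start.toNat].length : Int) ≤ maxWidth := by
          simp only [PySem.Str.len_eq, String.length_toList] at hfit
          omega
        simp [hfit']
    · have hlen : words.length ≤ start.toNat := by omega
      simp [pvALoop, hlt, List.drop_eq_nil_of_le hlen, pvCnt]

-- every entry of the prefix table strictly exceeds the starting total
theorem pvPrefix_gt (ws : List String) : ∀ (total x : Int), x ∈ pvPrefix ws total → total < x := by
  induction ws with
  | nil => intro total x hx; simp [pvPrefix] at hx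
  | cons w ws ih =>
    intro total x hx
    have hw : (0 : Int) ≤ PySem.Str.len w := by simp [PySem.Str.len_eq]
    rcases (by simpa [pvPrefix] using hx) with h | h
    · omega
    · have := ih _ _ h; omega

theorem pvPrefix_pairwise (ws : List String) : ∀ total : Int, (pvPrefix ws total).Pairwise (· < ·) := by
  induction ws with
  | nil => intro total; simp [pvPrefix]
  | cons w ws ih =>
    intro total
    refine List.pairwise_cons.mpr ⟨?_, ih _⟩
    intro x hx
    exact pvPrefix_gt ws _ x hx

-- the greedy count equals the number of prefix entries ≤ target (entries are increasing)
theorem pvCnt_eq_countP (target : Int) :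
    ∀ (ws : List String) (chars : Int),
    (pvCnt target chars ws : Int) = ((pvPrefix ws chars).countP (fun x => decide (x ≤ target)) : Int) := by
  intro ws
  induction ws with
  | nil => intro chars; simp [pvCnt, pvPrefix]
  | cons w ws ih =>
    intro chars
    have hz : ¬ chars + PySem.Str.len w + 1 ≤ target →
        (pvPrefix ws (chars + PySem.Str.len w + 1)).countP (fun x => decide (x ≤ target)) = 0 := by
      intro hfit
      rw [List.countP_eq_zero]
      intro x hx
      have := pvPrefix_gt ws _ x hx
      simp
      omega
    have hih := ih (chars + PySem.Str.len w + 1)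
    simp only [pvCnt, pvPrefix, List.countP_cons, decide_eq_true_eq]
    split_ifs with hfit
    · push_cast
      omega
    · have := hz hfit
      push_cast
      omega

-- countP of a list that is ≤ target exactly below position k is k
theorem countP_eq_of_cut (target : Int) :
    ∀ (p : List Int) (k : Nat), k ≤ p.length →
    (∀ i (h : i < p.length), i < k → p[i] ≤ target) →
    (∀ i (h : i < p.length), k ≤ i → target < p[i]) →
    p.countP (fun x => decide (x ≤ target)) = k := by
  intro p
  induction p with
  | nil =>
    intro k hk _ _
    simp only [List.length_nil, Nat.le_zero] at hk
    simp [hk]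
  | cons a l ih =>
    intro k hk hlo hhi
    cases k with
    | zero =>
      have ha : target < a := hhi 0 (by simp) (by omega)
      have hz : l.countP (fun x => decide (x ≤ target)) = 0 := by
        apply ih 0 (by omega)
        · intro i h hi; omega
        · intro i h _
          have := hhi (i + 1) (by simp; omega) (by omega)
          simpa using this
      simp [List.countP_cons, hz]
      omega
    | succ k' =>
      have hk' : k' ≤ l.length := by
        simp only [List.length_cons] at hk
        omega
      have ha : a ≤ target := by
        have := hlo 0 (by simp) (by omega)
        simpa using this
      have hl : l.countP (fun x => decide (x ≤ target)) = k' := by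
        apply ih k' hk'
        · intro i h hi
          have := hlo (i + 1) (by simp; omega) (by omega)
          simpa using this
        · intro i h hi
          have := hhi (i + 1) (by simp; omega) (by omega)
          simpa using this
      simp [hl, ha]

-- the binary-search loop returns the cut point = countP, for a sorted table
theorem pvBisect_eq_countP (p : List Int) (target : Int)
    (hsorted : p.Pairwise (· < ·)) :
    ∀ (fuel lo hi : Nat), hi ≤ p.length → lo ≤ hi → hi - lo ≤ fuel →
    (∀ i (h : i < p.length), i < lo → p[i] ≤ target) →
    (∀ i (h : i < p.length), hi ≤ i → target < p[i]) →
    pvBisect p target fuel lo hi = p.countP (fun x => decide (x ≤ target)) := by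
  have hmono : ∀ i j (hij : i ≤ j) (hj : j < p.length), p[i]'(by omega) ≤ p[j] := by
    intro i j hij hj
    rcases Nat.lt_or_ge i j with h | h
    · exact le_of_lt ((List.pairwise_iff_getElem.mp hsorted) i j (by omega) hj h)
    · have hij' : i = j := by omega
      subst hij'
      exact le_refl _
  intro fuel
  induction fuel with
  | zero =>
    intro lo hi hhi hlohi hf hbelow habove
    have : lo = hi := by omega
    subst this
    simp only [pvBisect]
    exact (countP_eq_of_cut target p lo (by omega) hbelow habove).symm
  | succ fuel ih =>
    intro lo hi hhi hlohi hf hbelow habove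
    by_cases hlt : lo < hi
    · have hmidlt : (lo + hi) / 2 < p.length := by omega
      have hgetD : p.getD ((lo + hi) / 2) 0 = p[(lo + hi) / 2] := List.getD_eq_getElem p 0 hmidlt
      simp only [pvBisect, hlt, if_true, hgetD]
      by_cases hcmp : p[(lo + hi) / 2] ≤ target
      · simp only [hcmp, if_true]
        apply ih ((lo + hi) / 2 + 1) hi hhi (by omega) (by omega) _ habove
        intro i h hi'
        exact le_trans (hmono i ((lo + hi) / 2) (by omega) hmidlt) hcmp
      · simp only [hcmp, if_false]
        apply ih lo ((lo + hi) / 2) (by omega) (by omega) (by omega) hbelow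
        intro i h hi'
        exact lt_of_lt_of_le (by omega) (hmono ((lo + hi) / 2) i hi' h)
    · have : lo = hi := by omega
      subst this
      simp only [pvBisect, hlt, if_false]
      exact (countP_eq_of_cut target p lo (by omega) hbelow habove).symm

-- ===== VERDICT (by name: the statement is the Claim_ definition above) =====
theorem findSameLineWords_spec : Claim_equal_findSameLineWords := by
  intro start maxWidth words _ hpre
  have h0 : (0 : Int) ≤ start := hpre
  unfold Spec_findSameLineWords findSameLineWords findSameLineWords_alt
  rw [PySem.List.slice_from words h0]
  show pvALoop words maxWidth (PySem.List.len words - start).toNat start 0 - 1 =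
    start + (pvBisect (pvPrefix (words.drop start.toNat) 0) (maxWidth + 1)
      ((pvPrefix (words.drop start.toNat) 0).length + 1) 0
      (pvPrefix (words.drop start.toNat) 0).length : Int) - 1
  rw [show (PySem.List.len words - start).toNat = ((words.length : Int) - start).toNat by
    simp [PySem.List.len_eq]]
  rw [pvALoop_eq_cnt words maxWidth _ start 0 h0 (le_refl _)]
  rw [pvBisect_eq_countP (pvPrefix (words.drop start.toNat) 0) (maxWidth + 1)
    (pvPrefix_pairwise _ 0) _ 0 _ (le_refl _) (by omega) (by omega)
    (by intro i h hi; omega) (by intro i h hi; omega)]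
  have := pvCnt_eq_countP (maxWidth + 1) (words.drop start.toNat) 0
  omega
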